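-- pv_equiv track=rewrite | github.com/AutoclickerI/Baekjoon | 백준/Silver/1972. 놀라운 문자열/놀라운 문자열.py | sup
-- ===== SOURCE A (Python) =====
-- def sup(s):
--     for i in range(1,len(s)):
--         v={}
--         for j in range(i,len(s)):
--             t=s[j-i]+s[j]
--             if t in v:
--                 return 0
--             v[t]=1
--     return 1
-- ===== SOURCE B (Python) =====
-- def sup(s):
--     n = len(s)
--     for i in range(1, n):
--         pairs = sorted((s[j - i], s[j]) for j in range(i, n))
--         if any(a == b for a, b in zip(pairs, pairs[1:])):
--             return 0
--     return 1
-- ===== Notes on version B (the rewrite author's own statement) =====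
-- stated objective: alternative
-- what changed: Per distance class, duplicate pairs are detected by sorting the list of (s[j-i], s[j]) pairs and scanning adjacent sorted entries for an equal neighbour, instead of incremental dict-membership testing with an early return inside the scan.
import Mathlib
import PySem

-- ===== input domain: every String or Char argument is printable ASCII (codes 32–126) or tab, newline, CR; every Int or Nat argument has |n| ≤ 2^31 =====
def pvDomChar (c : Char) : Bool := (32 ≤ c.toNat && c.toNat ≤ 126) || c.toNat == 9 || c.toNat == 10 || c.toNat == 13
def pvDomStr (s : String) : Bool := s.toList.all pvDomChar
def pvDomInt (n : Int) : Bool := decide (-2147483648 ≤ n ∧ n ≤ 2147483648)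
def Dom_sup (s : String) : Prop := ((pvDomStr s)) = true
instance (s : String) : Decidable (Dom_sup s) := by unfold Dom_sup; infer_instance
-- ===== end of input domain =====

-- B differs from A by detecting duplicate distance-i pairs via sort + adjacent scan
-- instead of incremental dict membership; return values are proved equal for every input.

-- ===== PORT A =====
-- inner loop 'for j in range(i,len(s)): t=s[j-i]+s[j]; if t in v: return 0; v[t]=1';
-- the 2-char string key s[j-i]+s[j] is represented by its character pair (injective, so
-- membership in the dict is the same test); js is range(i, len(s)).
def supInnerA (cs : List Char) (i : Nat) : List Nat → PySem.Dict (Char × Char) Int → Bool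
  | [], _ => false
  | j :: js, v =>
    let t : Char × Char := (cs.getD (j - i) ' ', cs.getD j ' ')
    if v.contains t then true else supInnerA cs i js (v.insert t 1)

-- outer loop 'for i in range(1,len(s))', early 'return 0' when the inner loop hits a repeat
def supOuterA (cs : List Char) : List Nat → Int
  | [] => 1
  | i :: is =>
    if supInnerA cs i (List.range' i (cs.length - i)) PySem.Dict.empty then 0
    else supOuterA cs is

def sup (s : String) : Int :=
  supOuterA s.toList (List.range' 1 (s.toList.length - 1))

-- ===== PORT B =====
-- Python's tuple order on pairs of 1-char strings, as a Bool relation on Char × Char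
def pairLe (p q : Char × Char) : Bool := p.1 < q.1 || (p.1 == q.1 && p.2 ≤ q.2)

-- 'any(a == b for a, b in zip(pairs, pairs[1:]))': adjacent-equal scan
def hasAdjDup : List (Char × Char) → Bool
  | a :: b :: rest => a == b || hasAdjDup (b :: rest)
  | _ => false

-- '[(s[j-i], s[j]) for j in range(i, n)]'
def pairsB (cs : List Char) (i : Nat) : List (Char × Char) :=
  (List.range' i (cs.length - i)).map (fun j => (cs.getD (j - i) ' ', cs.getD j ' '))

def supOuterB (cs : List Char) : List Nat → Int
  | [] => 1
  | i :: is =>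
    if hasAdjDup ((pairsB cs i).mergeSort pairLe) then 0
    else supOuterB cs is

def sup_alt (s : String) : Int :=
  supOuterB s.toList (List.range' 1 (s.toList.length - 1))

-- ===== PRECONDITION & SPEC =====
def Spec_sup (s : String) (out : Int) : Prop := out = sup_alt s
instance (s : String) (out : Int) : Decidable (Spec_sup s out) := by unfold Spec_sup; infer_instance

-- ===== CLAIM (what is proved, stated in full; the proofs are below) =====
def Claim_equal_sup : Prop := ∀ (s : String), Dom_sup s → Spec_sup s (sup s)

-- ===== LEMMAS AND PROOFS =====

theorem pairLe_total (p q : Char × Char) : pairLe p q = true ∨ pairLe q p = true := by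
  simp only [pairLe, Bool.or_eq_true, Bool.and_eq_true, decide_eq_true_eq, beq_iff_eq]
  rcases lt_trichotomy p.1 q.1 with h | h | h
  · exact Or.inl (Or.inl (by simpa using h))
  · rcases le_total p.2 q.2 with h2 | h2
    · exact Or.inl (Or.inr ⟨by simpa using h, by simpa using h2⟩)
    · exact Or.inr (Or.inr ⟨by simpa using h.symm, by simpa using h2⟩)
  · exact Or.inr (Or.inl (by simpa using h))

theorem pairLe_trans (p q r : Char × Char) (h1 : pairLe p q = true) (h2 : pairLe q r = true) :
    pairLe p r = true := by
  simp only [pairLe, Bool.or_eq_true, Bool.and_eq_true, decide_eq_true_eq, beq_iff_eq] at *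
  rcases h1 with h1 | ⟨h1, h1'⟩ <;> rcases h2 with h2 | ⟨h2, h2'⟩
  · exact Or.inl (h1.trans h2)
  · exact Or.inl (h2 ▸ h1)
  · exact Or.inl (h1 ▸ h2)
  · exact Or.inr ⟨h1.trans h2, h1'.trans h2'⟩

theorem pairLe_antisymm (p q : Char × Char) (h1 : pairLe p q = true) (h2 : pairLe q p = true) :
    p = q := by
  simp only [pairLe, Bool.or_eq_true, Bool.and_eq_true, decide_eq_true_eq, beq_iff_eq] at h1 h2
  rcases h1 with h1 | ⟨h1, h1'⟩ <;> rcases h2 with h2 | ⟨h2, h2'⟩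
  · exact absurd (h1.trans h2) (lt_irrefl _)
  · exact absurd h1 (h2 ▸ lt_irrefl _)
  · exact absurd h2 (h1 ▸ lt_irrefl _)
  · exact Prod.ext h1 (le_antisymm h1' h2')

-- A's inner loop returns false iff the pairs it would see are fresh and pairwise distinct
theorem supInnerA_false_iff (cs : List Char) (i : Nat) (js : List Nat)
    (v : PySem.Dict (Char × Char) Int) :
    supInnerA cs i js v = false ↔
      ((js.map (fun j => (cs.getD (j - i) ' ', cs.getD j ' '))).Nodup ∧
       ∀ t ∈ js.map (fun j => (cs.getD (j - i) ' ', cs.getD j ' ')), v.contains t = false) := by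
  induction js generalizing v with
  | nil => simp [supInnerA]
  | cons j js ih =>
    simp only [supInnerA, List.map_cons, List.nodup_cons, List.mem_cons]
    by_cases h : v.contains (cs.getD (j - i) ' ', cs.getD j ' ') = true
    · simp only [h, if_true]
      constructor
      · intro hf; exact Bool.noConfusion hf
      · rintro ⟨-, hall⟩
        have hfalse := hall _ (Or.inl rfl)
        rw [h] at hfalse
        exact Bool.noConfusion hfalse
    · rw [if_neg (by simpa using h)]
      rw [ih]
      constructor
      · rintro ⟨hnd, hall⟩
        refine ⟨⟨?_, hnd⟩, ?_⟩
        · intro hmem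
          have := hall _ hmem
          rw [PySem.Dict.contains_insert] at this
          simp at this
        · rintro t (rfl | hmem)
          · simpa using h
          · have := hall t hmem
            rw [PySem.Dict.contains_insert] at this
            simp only [Bool.or_eq_false_iff] at this
            exact this.2
      · rintro ⟨⟨hnm, hnd⟩, hall⟩
        refine ⟨hnd, ?_⟩
        intro t hmem
        rw [PySem.Dict.contains_insert]
        simp only [Bool.or_eq_false_iff]
        refine ⟨?_, hall t (Or.inr hmem)⟩
        simp only [beq_eq_false_iff_ne, ne_eq]
        rintro rfl; exact hnm hmem

-- adjacent-equal scan on a pairLe-sorted list detects exactly non-Nodup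
theorem hasAdjDup_sorted_iff (l : List (Char × Char)) (hs : l.Pairwise (fun a b => pairLe a b = true)) :
    hasAdjDup l = true ↔ ¬ l.Nodup := by
  induction l with
  | nil => simp [hasAdjDup]
  | cons a t ih =>
    cases t with
    | nil => simp [hasAdjDup]
    | cons b r =>
      rw [List.pairwise_cons] at hs
      obtain ⟨hab, hs'⟩ := hs
      simp only [hasAdjDup, Bool.or_eq_true, beq_iff_eq]
      rw [ih hs']
      constructor
      · rintro (rfl | hdup)
        · simp
        · intro hnd
          exact hdup ((List.sublist_cons_self a (b :: r)).nodup hnd)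
      · intro hnd
        by_cases heq : a = b
        · exact Or.inl heq
        · refine Or.inr ?_
          intro hnd'
          apply hnd
          rw [List.nodup_cons]
          refine ⟨?_, hnd'⟩
          intro hmem
          rcases List.mem_cons.mp hmem with h' | h'
          · exact heq h'
          · -- a ∈ r: then pairLe b a from sortedness of b :: r, and pairLe a b; antisymm ⇒ a = b
            rw [List.pairwise_cons] at hs'
            exact heq (pairLe_antisymm a b (hab b List.mem_cons_self) (hs'.1 a h'))

theorem mergeSort_pairLe_sorted (l : List (Char × Char)) :
    (l.mergeSort pairLe).Pairwise (fun a b => pairLe a b = true) := by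
  have := List.pairwise_mergeSort (le := pairLe)
    (fun a b c => pairLe_trans a b c)
    (fun a b => by rcases pairLe_total a b with h | h <;> simp [h]) l
  exact this

-- the per-i conditions of the two outer loops coincide
theorem cond_eq (cs : List Char) (i : Nat) :
    supInnerA cs i (List.range' i (cs.length - i)) PySem.Dict.empty
      = hasAdjDup ((pairsB cs i).mergeSort pairLe) := by
  have hA : supInnerA cs i (List.range' i (cs.length - i)) PySem.Dict.empty = false ↔
      (pairsB cs i).Nodup := by
    rw [supInnerA_false_iff]
    simp [pairsB, PySem.Dict.contains_empty]
  have hB : hasAdjDup ((pairsB cs i).mergeSort pairLe) = true ↔ ¬ (pairsB cs i).Nodup := by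
    rw [hasAdjDup_sorted_iff _ (mergeSort_pairLe_sorted _)]
    constructor
    · intro h hnd; exact h ((List.mergeSort_perm _ _).nodup_iff.mpr hnd)
    · intro h hnd; exact h ((List.mergeSort_perm _ _).nodup_iff.mp hnd)
  cases hA' : supInnerA cs i (List.range' i (cs.length - i)) PySem.Dict.empty
  · rw [eq_comm, ← Bool.not_eq_true, hB]
    intro h; exact h (hA.mp hA')
  · rw [eq_comm, hB]
    intro hnd
    exact absurd (hA.mpr hnd) (by simp [hA'])

theorem outer_eq (cs : List Char) (is : List Nat) : supOuterA cs is = supOuterB cs is := by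
  induction is with
  | nil => rfl
  | cons i is ih =>
    simp only [supOuterA, supOuterB, cond_eq]
    split <;> [rfl; exact ih]

-- ===== VERDICT (by name: the statement is the Claim_ definition above) =====
theorem sup_spec : Claim_equal_sup := by
  intro s _
  unfold Spec_sup sup sup_alt
  exact outer_eq _ _
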